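-- pv_equiv track=rewrite | github.com/SachinChougule10/DSA-in-Python | Bit Manipulation/02_Problems/02_Subsets/02_GFG/01_optimal_bitmasking_solution.py | all_possible_strings
-- ===== SOURCE A (Python) =====
-- def all_possible_strings(s: str):
--     # Length of the string
--     n = len(s)
--
--     # Total subsets = 2^n
--     no_of_subsets = 1 << n
--
--     # To store all subsequences
--     result = []
--
--     # Loop from 1 to (2^n - 1) to avoid empty subset
--     for ch in range(1, no_of_subsets):
--         subset = ""  # Store current subsequence
--
--         # Check each bit position
--         for i in range(n):
--             # If ith bit is set, include s[i]
--             if ch & (1 << i):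
--                 subset += s[i]
--
--         # Add subsequence to result
--         result.append(subset)
--
--     result.sort()  # Sort lexicographically
--     return result
-- ===== SOURCE B (Python) =====
-- def all_possible_strings(s: str):
--     # Iterative doubling: process characters from last to first; each step maps
--     # every known subsequence t of the processed suffix to (t, c + t).
--     # subs[0] stays "" throughout; drop it and sort.
--     subs = [""]
--     for c in reversed(s):
--         subs = [x for t in subs for x in (t, c + t)]
--     return sorted(subs[1:])
-- ===== Notes on version B (the rewrite author's own statement) =====
-- stated objective: alternative
-- what changed: Replaces the bitmask enumeration (for each of the 2^n masks, an inner scan over all n bit positions) by iterative doubling: one pass over the characters from last to first, mapping each known subsequence t to (t, c+t), then the same final sort.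
import Mathlib
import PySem

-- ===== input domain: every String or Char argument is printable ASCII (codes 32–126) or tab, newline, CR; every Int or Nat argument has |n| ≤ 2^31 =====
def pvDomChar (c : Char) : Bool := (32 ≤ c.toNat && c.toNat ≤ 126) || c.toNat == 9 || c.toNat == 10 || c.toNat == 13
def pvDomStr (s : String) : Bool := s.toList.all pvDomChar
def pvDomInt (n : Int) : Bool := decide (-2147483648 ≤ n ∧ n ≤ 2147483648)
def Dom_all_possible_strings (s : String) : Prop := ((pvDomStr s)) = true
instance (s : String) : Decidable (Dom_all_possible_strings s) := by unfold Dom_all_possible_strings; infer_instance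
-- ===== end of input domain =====

-- B replaces A's bitmask enumeration (inner scan over all n bit positions per mask) by one
-- doubling pass over the characters from last to first, keeping the same final sort.

-- ===== PORT A =====
def all_possible_strings (s : String) : List String :=
  let cs := s.toList
  let n := cs.length
  let no_of_subsets : Int := (1 : Int) <<< (n : Int)
  let result : List String :=
    (PySem.List.pyRange 1 no_of_subsets 1).foldl (fun result ch =>
      let subset : List Char :=
        (PySem.List.pyRange 0 (n : Int) 1).foldl (fun subset i =>
          if PySem.Int.band ch ((1 : Int) <<< (i.toNat : Int)) ≠ 0 then
            subset ++ [PySem.List.pyGetD cs i ' ']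
          else subset) []
      result ++ [String.ofList subset]) []
  PySem.List.sorted result (fun x => x) false

-- ===== PORT B =====
def all_possible_strings_alt (s : String) : List String :=
  let subs : List (List Char) :=
    s.toList.reverse.foldl (fun subs c => subs.flatMap (fun t => [t, c :: t])) [[]]
  PySem.List.sorted ((subs.drop 1).map String.ofList) (fun x => x) false

-- ===== PRECONDITION & SPEC =====
def Spec_all_possible_strings (s : String) (out : List String) : Prop := out = all_possible_strings_alt s
instance (s : String) (out : List String) : Decidable (Spec_all_possible_strings s out) := by unfold Spec_all_possible_strings; infer_instance

-- ===== CLAIM (what is proved, stated in full; the proofs are below) =====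
def Claim_equal_all_possible_strings : Prop := ∀ (s : String), Dom_all_possible_strings s → Spec_all_possible_strings s (all_possible_strings s)

-- ===== LEMMAS AND PROOFS =====

-- the subsequence selected by mask k: bit j of k picks cs[j]
def pvPick : List Char → Nat → List Char
  | [], _ => []
  | c :: cs, k => (if k % 2 = 1 then [c] else []) ++ pvPick cs (k / 2)

-- B's doubling pass (definitionally the fold in all_possible_strings_alt)
def pvDbl (cs : List Char) : List (List Char) :=
  cs.reverse.foldl (fun subs c => subs.flatMap (fun t => [t, c :: t])) [[]]

-- A's inner loop (definitionally the inner fold in all_possible_strings)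
def pvInner (cs : List Char) (ch : Int) : List Char :=
  (PySem.List.pyRange 0 (cs.length : Int) 1).foldl (fun subset i =>
    if PySem.Int.band ch ((1 : Int) <<< (i.toNat : Int)) ≠ 0 then
      subset ++ [PySem.List.pyGetD cs i ' ']
    else subset) []

theorem pvDbl_cons (c : Char) (cs : List Char) :
    pvDbl (c :: cs) = (pvDbl cs).flatMap (fun t => [t, c :: t]) := by
  simp [pvDbl, List.foldl_append]

theorem pvRangeTwoMul (m : Nat) :
    List.range (2 * m) = (List.range m).flatMap (fun k => [2 * k, 2 * k + 1]) := by
  induction m with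
  | zero => simp
  | succ m ih =>
    have h : 2 * (m + 1) = 2 * m + 1 + 1 := by ring
    rw [h]
    simp [List.range_succ, List.flatMap_append, ih]

theorem pvPick_even (c : Char) (cs : List Char) (k : Nat) :
    pvPick (c :: cs) (2 * k) = pvPick cs k := by
  have h1 : 2 * k % 2 = 0 := by omega
  have h2 : 2 * k / 2 = k := by omega
  simp [pvPick, h1, h2]

theorem pvPick_odd (c : Char) (cs : List Char) (k : Nat) :
    pvPick (c :: cs) (2 * k + 1) = c :: pvPick cs k := by
  have h1 : (2 * k + 1) % 2 = 1 := by omega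
  have h2 : (2 * k + 1) / 2 = k := by omega
  simp [pvPick, h1, h2]

theorem pvMain (cs : List Char) :
    (List.range (2 ^ cs.length)).map (pvPick cs) = pvDbl cs := by
  induction cs with
  | nil => decide
  | cons c cs ih =>
    rw [pvDbl_cons, ← ih, List.flatMap_map]
    have hlen : (c :: cs).length = cs.length + 1 := rfl
    rw [hlen, pow_succ, Nat.mul_comm, pvRangeTwoMul, List.map_flatMap]
    simp [pvPick_even, pvPick_odd]

theorem pvNat (cs : List Char) : ∀ k : Nat,
    List.map (fun j => cs.getD j ' ')
      (List.filter (fun j => k.testBit j) (List.range cs.length)) = pvPick cs k := by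
  induction cs with
  | nil => intro k; simp [pvPick]
  | cons c cs ih =>
    intro k
    have hlen : (c :: cs).length = cs.length + 1 := rfl
    rw [hlen, List.range_succ_eq_map, List.filter_cons, List.filter_map]
    have hb : ((fun j => k.testBit j) ∘ Nat.succ) = fun j => (k / 2).testBit j :=
      funext fun j => by simp [Function.comp, Nat.testBit_add_one]
    rw [hb]
    by_cases h : k % 2 = 1 <;>
      simp [h, Nat.testBit_zero, List.map_map, Function.comp_def, pvPick] <;>
      simpa using ih (k / 2)

theorem pvInner_eq_pick (cs : List Char) (k : Nat) :
    pvInner cs (k : Int) = pvPick cs k := by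
  unfold pvInner
  rw [PySem.List.foldl_append_ite
        (p := fun i : Int => PySem.Int.band (k : Int) ((1 : Int) <<< (i.toNat : Int)) ≠ 0)
        (f := fun i : Int => PySem.List.pyGetD cs i ' ')]
  rw [PySem.List.pyRange_zero_nat, List.filter_map, List.map_map, List.nil_append]
  have htest : ∀ j : Nat,
      (decide (PySem.Int.band (k : Int) ((1 : Int) <<< ((((j : Int)).toNat : Int))) ≠ 0)) = k.testBit j := by
    intro j
    have h2 : ((1 : Int) <<< ((((j : Int)).toNat : Int))) = ((1 <<< j : Nat) : Int) := by
      rw [Int.toNat_natCast]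
      exact_mod_cast Int.shiftLeft_natCast 1 j
    rw [h2, PySem.Int.band_natCast, Nat.one_shiftLeft, Nat.and_two_pow]
    cases h : k.testBit j <;> simp
  simp only [Function.comp_def, htest, PySem.List.pyGetD_natCast]
  exact pvNat cs k

theorem pvA_pre (cs : List Char) :
    (PySem.List.pyRange 1 ((1 : Int) <<< (cs.length : Int)) 1).foldl
      (fun result ch => result ++ [String.ofList (pvInner cs ch)]) []
    = ((pvDbl cs).drop 1).map String.ofList := by
  rw [PySem.List.foldl_append_singleton_eq_map, List.nil_append, PySem.List.pyRange_one,
    List.map_map]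
  have hsh : ((1 : Int) <<< (cs.length : Int)) = ((2 ^ cs.length : Nat) : Int) := by
    have h := Int.shiftLeft_natCast 1 cs.length
    rw [Nat.one_shiftLeft] at h
    exact_mod_cast h
  rw [hsh]
  have hpos : 0 < 2 ^ cs.length := Nat.two_pow_pos cs.length
  have htn : ∀ a : Nat, 0 < a → (((a : Nat) : Int) - 1).toNat = a - 1 := by
    intro a ha; omega
  rw [htn _ hpos, ← pvMain]
  have hdrop : ((((List.range (2 ^ cs.length)).map (pvPick cs)).drop 1).map String.ofList)
      = (List.range (2 ^ cs.length - 1)).map (fun k => String.ofList (pvPick cs (k + 1))) := by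
    conv_lhs => rw [show 2 ^ cs.length = (2 ^ cs.length - 1) + 1 by omega,
      List.range_succ_eq_map]
    simp [List.map_map, Function.comp_def]
  rw [hdrop]
  apply List.map_congr_left
  intro k _
  simp only [Function.comp_def]
  have hc : (1 : Int) + (k : Int) = ((k + 1 : Nat) : Int) := by push_cast; ring
  rw [hc, pvInner_eq_pick]

-- ===== VERDICT (by name: the statement is the Claim_ definition above) =====
theorem all_possible_strings_spec : Claim_equal_all_possible_strings := by
  intro s _
  show all_possible_strings s = all_possible_strings_alt s
  show PySem.List.sorted
      ((PySem.List.pyRange 1 ((1 : Int) <<< (s.toList.length : Int)) 1).foldl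
        (fun result ch => result ++ [String.ofList (pvInner s.toList ch)]) [])
      (fun x => x) false
    = PySem.List.sorted (((pvDbl s.toList).drop 1).map String.ofList) (fun x => x) false
  rw [pvA_pre]
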